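-- pv_equiv track=rewrite | github.com/kujabes/SpaCy-Music | generate_profiles.py | root_bias_profile_generator
-- ===== SOURCE A (Python) =====
-- PITCH_CLASSES = ['C', 'C#', 'D', 'D#', 'E', 'F', 'F#', 'G', 'G#', 'A', 'A#', 'B']
--
-- def root_bias_profile_generator(scale, root):
--     profile = [0] * 12
--     for i, note in enumerate(PITCH_CLASSES):
--         if note in scale:
--             if note == root:
--                 profile[i] = 2
--             else:
--                 profile[i] = 1
--
--     return profile
-- ===== SOURCE B (Python) =====
-- PITCH_CLASSES = ['C', 'C#', 'D', 'D#', 'E', 'F', 'F#', 'G', 'G#', 'A', 'A#', 'B']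
--
-- def root_bias_profile_generator(scale, root):
--     index = {name: i for i, name in enumerate(PITCH_CLASSES)}
--     profile = [0] * 12
--     for note in scale:
--         if note in index:
--             profile[index[note]] = 1
--     if root in scale and root in index:
--         profile[index[root]] = 2
--     return profile
-- ===== Notes on version B (the rewrite author's own statement) =====
-- stated objective: faster
-- what changed: B inverts the traversal: instead of scanning the 12 pitch classes and testing each for membership in the scale, it builds a name-to-index dict once, loops over the scale's notes marking positions directly, then marks the root's slot.
import Mathlib
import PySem

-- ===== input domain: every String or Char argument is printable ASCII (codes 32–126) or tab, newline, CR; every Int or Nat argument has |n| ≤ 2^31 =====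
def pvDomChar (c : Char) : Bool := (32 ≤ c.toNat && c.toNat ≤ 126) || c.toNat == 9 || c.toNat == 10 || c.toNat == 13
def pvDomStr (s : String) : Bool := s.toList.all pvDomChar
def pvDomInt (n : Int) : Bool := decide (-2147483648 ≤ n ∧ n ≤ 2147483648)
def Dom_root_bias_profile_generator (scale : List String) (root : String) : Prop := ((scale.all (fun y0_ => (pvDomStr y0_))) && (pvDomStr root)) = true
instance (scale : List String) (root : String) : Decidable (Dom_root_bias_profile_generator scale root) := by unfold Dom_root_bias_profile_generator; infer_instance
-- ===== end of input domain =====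

-- B inverts the traversal: instead of scanning the 12 pitch classes and testing each for
-- membership in the scale, it loops over the scale's notes and marks positions through a
-- name→index map, then marks the root's slot; same return value (objective: faster, measured).

-- ===== PORT A =====
def pitchClasses : List String := ["C", "C#", "D", "D#", "E", "F", "F#", "G", "G#", "A", "A#", "B"]

def root_bias_profile_generator (scale : List String) (root : String) : List Int :=
  (PySem.List.enumerate pitchClasses).foldl
    (fun profile p =>
      if p.2 ∈ scale then
        if p.2 = root then PySem.List.pySetD profile p.1 2
        else PySem.List.pySetD profile p.1 1
      else profile)
    (List.replicate 12 0)

-- ===== PORT B =====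
-- index = {name: i for i, name in enumerate(PITCH_CLASSES)}
def pitchIndex : PySem.Dict String Int :=
  (PySem.List.enumerate pitchClasses).foldl (fun d p => d.insert p.2 p.1) PySem.Dict.empty

def root_bias_profile_generator_alt (scale : List String) (root : String) : List Int :=
  let profile := scale.foldl
    (fun profile note =>
      match pitchIndex.get? note with
      | some i => PySem.List.pySetD profile i 1
      | none => profile)
    (List.replicate 12 0)
  if root ∈ scale then
    match pitchIndex.get? root with
    | some i => PySem.List.pySetD profile i 2
    | none => profile
  else profile

-- ===== PRECONDITION & SPEC =====
def Spec_root_bias_profile_generator (scale : List String) (root : String) (out : List Int) : Prop := out = root_bias_profile_generator_alt scale root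
instance (scale : List String) (root : String) (out : List Int) : Decidable (Spec_root_bias_profile_generator scale root out) := by unfold Spec_root_bias_profile_generator; infer_instance

-- ===== CLAIM (what is proved, stated in full; the proofs are below) =====
def Claim_equal_root_bias_profile_generator : Prop := ∀ (scale : List String) (root : String), Dom_root_bias_profile_generator scale root → Spec_root_bias_profile_generator scale root (root_bias_profile_generator scale root)

-- ===== LEMMAS AND PROOFS =====

-- the value A assigns to the slot of pitch-class `name`
def pcVal (scale : List String) (root : String) (name : String) : Int :=
  if name ∈ scale then (if name = root then 2 else 1) else 0

-- the j-th pitch-class name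
def pc (j : Nat) : String := pitchClasses.getD j ""

lemma pc_inj : ∀ i : Nat, i < 12 → ∀ j : Nat, j < 12 → (pc i = pc j ↔ i = j) := by decide

lemma pc_mem : ∀ j : Nat, j < 12 → pc j ∈ pitchClasses := by decide

lemma get?_pc : ∀ i : Nat, i < 12 → pitchIndex.get? (pc i) = some (i : Int) := by decide

lemma keys_pitchIndex : (PySem.Dict.keys pitchIndex) = pitchClasses := by rfl

lemma A_loop (scale : List String) (root : String) :
    ∀ (names : List String) (pre : List Int),
      List.foldl
        (fun profile (p : Int × String) =>
          if p.2 ∈ scale then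
            if p.2 = root then PySem.List.pySetD profile p.1 2
            else PySem.List.pySetD profile p.1 1
          else profile)
        (pre ++ names.map (fun _ => (0 : Int)))
        (PySem.List.enumerate names (pre.length : Int))
      = pre ++ names.map (pcVal scale root) := by
  intro names
  induction names with
  | nil => intro pre; simp
  | cons name rest ih =>
    intro pre
    rw [PySem.List.enumerate_cons]
    simp only [List.foldl_cons, List.map_cons]
    have hstep :
        (if name ∈ scale then
           if name = root then PySem.List.pySetD (pre ++ 0 :: rest.map (fun _ => (0:Int))) (pre.length : Int) 2
           else PySem.List.pySetD (pre ++ 0 :: rest.map (fun _ => (0:Int))) (pre.length : Int) 1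
         else pre ++ 0 :: rest.map (fun _ => (0:Int)))
        = (pre ++ [pcVal scale root name]) ++ rest.map (fun _ => (0:Int)) := by
      unfold pcVal
      by_cases h2 : name = root
      · subst h2
        by_cases h1 : name ∈ scale <;> simp [h1, PySem.List.pySetD_natCast]
      · by_cases h1 : name ∈ scale <;> simp [h1, h2, PySem.List.pySetD_natCast]
    rw [hstep,
      show ((pre.length : Int) + 1) = (((pre ++ [pcVal scale root name]).length : Int)) by simp,
      ih (pre ++ [pcVal scale root name])]
    simp

lemma A_eq_map (scale : List String) (root : String) :
    root_bias_profile_generator scale root = pitchClasses.map (pcVal scale root) := by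
  have h := A_loop scale root pitchClasses []
  simpa [root_bias_profile_generator] using h

lemma set_branch (pr : List Int) (h : pr.length = 12) (v : Int) (i j : Nat) (hi : i < 12) (hj : j < 12) :
    (PySem.List.pySetD pr ((i : Nat) : Int) v)[j]? = if pc i = pc j then some v else pr[j]? := by
  rw [PySem.List.pySetD_natCast, List.getElem?_set]
  simp only [pc_inj i hi j hj, h]
  split_ifs with h1 <;> simp_all

-- one marking step of B, elementwise
lemma mark_get (pr : List Int) (h : pr.length = 12) (note : String) (v : Int)
    (j : Nat) (hj : j < 12) :
    (match pitchIndex.get? note with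
     | some i => PySem.List.pySetD pr i v
     | none => pr)[j]? = if note = pc j then some v else pr[j]? := by
  by_cases hmem : note ∈ pitchClasses
  · have hi : pitchClasses.idxOf note < pitchClasses.length := List.idxOf_lt_length_of_mem hmem
    have hlt : pitchClasses.idxOf note < 12 := by simpa [pitchClasses] using hi
    have hpc : pc (pitchClasses.idxOf note) = note := by
      simp only [pc, List.getD_eq_getElem?_getD, List.getElem?_eq_getElem hi,
        List.getElem_idxOf hi, Option.getD_some]
    rw [← hpc, get?_pc _ hlt]
    exact set_branch pr h v _ j hlt hj
  · have hnone : pitchIndex.get? note = none := by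
      rw [PySem.Dict.get?_eq_none_iff_not_mem_keys, keys_pitchIndex]; exact hmem
    rw [hnone]
    have hne : ¬ note = pc j := fun e => hmem (e ▸ pc_mem j hj)
    simp [hne]

lemma mark_length (pr : List Int) (note : String) (v : Int) :
    (match pitchIndex.get? note with
     | some i => PySem.List.pySetD pr i v
     | none => pr).length = pr.length := by
  cases pitchIndex.get? note <;> simp [PySem.List.length_pySetD]

lemma B_loop :
    ∀ (notes : List String) (pr : List Int), pr.length = 12 →
      ((notes.foldl
        (fun profile note =>
          match pitchIndex.get? note with
          | some i => PySem.List.pySetD profile i 1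
          | none => profile) pr).length = 12 ∧
      ∀ (j : Nat), j < 12 →
        (notes.foldl
          (fun profile note =>
            match pitchIndex.get? note with
            | some i => PySem.List.pySetD profile i 1
            | none => profile) pr)[j]? = if pc j ∈ notes then some 1 else pr[j]?) := by
  intro notes
  induction notes with
  | nil => intro pr h; exact ⟨h, fun j hj => by simp⟩
  | cons n rest ih =>
    intro pr h
    simp only [List.foldl_cons]
    have hlen := mark_length pr n 1
    obtain ⟨ih1, ih2⟩ := ih _ (by rw [hlen, h])
    refine ⟨ih1, fun j hj => ?_⟩
    rw [ih2 j hj, mark_get pr h n 1 j hj]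
    by_cases h1 : pc j ∈ rest <;> by_cases h2 : n = pc j <;>
      simp [h1, h2, List.mem_cons, eq_comm]

-- ===== VERDICT (by name: the statement is the Claim_ definition above) =====
theorem root_bias_profile_generator_spec : Claim_equal_root_bias_profile_generator := by
  intro scale root _
  unfold Spec_root_bias_profile_generator
  obtain ⟨hBlen, hBget⟩ := B_loop scale (List.replicate 12 0) (by simp)
  set L := scale.foldl
      (fun profile note =>
        match pitchIndex.get? note with
        | some i => PySem.List.pySetD profile i 1
        | none => profile) (List.replicate 12 (0 : Int)) with hL
  have hBdef : root_bias_profile_generator_alt scale root =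
      (if root ∈ scale then
        (match pitchIndex.get? root with
         | some i => PySem.List.pySetD L i 2
         | none => L)
      else L : List Int) := rfl
  rw [A_eq_map, hBdef]
  apply List.ext_getElem?
  intro j
  by_cases hj : j < 12
  · have hjl : j < pitchClasses.length := by simp [pitchClasses]; omega
    have hpcj : pitchClasses[j]? = some (pc j) := by
      rw [List.getElem?_eq_getElem hjl]
      simp [pc, List.getD_eq_getElem?_getD, List.getElem?_eq_getElem hjl]
    have hA : (pitchClasses.map (pcVal scale root))[j]? = some (pcVal scale root (pc j)) := by
      rw [List.getElem?_map, hpcj]; rfl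
    rw [hA]
    have hrepl : (List.replicate 12 (0:Int))[j]? = some 0 := by rw [List.getElem?_replicate]; simp [hj]
    by_cases hr : root ∈ scale
    · rw [if_pos hr, mark_get L hBlen root 2 j hj, hBget j hj, hrepl]
      unfold pcVal
      by_cases h1 : root = pc j
      · rw [← h1]; simp [hr]
      · have h1' : ¬ pc j = root := fun e => h1 e.symm
        simp only [if_neg h1, if_neg h1']
        by_cases h2 : pc j ∈ scale <;> simp [h2]
    · rw [if_neg hr, hBget j hj, hrepl]
      unfold pcVal
      by_cases h2 : pc j ∈ scale
      · have : ¬ pc j = root := fun e => hr (e ▸ h2)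
        simp [h2, this]
      · simp [h2]
  · have hA : (pitchClasses.map (pcVal scale root))[j]? = none := by
      rw [List.getElem?_eq_none_iff]
      simp [pitchClasses]; omega
    have hBl : ((if root ∈ scale then
        (match pitchIndex.get? root with
         | some i => PySem.List.pySetD L i 2
         | none => L)
      else L : List Int)).length = 12 := by
      by_cases hr : root ∈ scale <;> simp [hr, mark_length, hBlen]
    rw [hA]
    symm
    rw [List.getElem?_eq_none_iff, hBl]
    omega
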